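-- pv_equiv track=rewrite | github.com/01irving/01irving.github.io | calculadora_embarazo.py | calcular_deposito_energia
-- ===== SOURCE A (Python) =====
-- def calcular_deposito_energia(edad):
--     depositos = {
--         (12, 13): 26,
--         (13, 14): 24,
--         (14, 15): 19,
--         (15, 16): 12,
--         (16, 17): 5,
--         (17, 18): 0
--     }
--
--     for (min_edad, max_edad), valor in depositos.items():
--         if edad >= min_edad and edad < max_edad:
--             return valor
--     return None
-- ===== SOURCE B (Python) =====
-- def calcular_deposito_energia(edad):
--     if 12 <= edad < 18:
--         return [26, 24, 19, 12, 5, 0][int(edad) - 12]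
--     return None
-- ===== Notes on version B (the rewrite author's own statement) =====
-- stated objective: simpler
-- what changed: Replaces the dict of ranges and linear scan with a guarded direct index into a flat list of the six values, computed arithmetically from the age offset.
import Mathlib
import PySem

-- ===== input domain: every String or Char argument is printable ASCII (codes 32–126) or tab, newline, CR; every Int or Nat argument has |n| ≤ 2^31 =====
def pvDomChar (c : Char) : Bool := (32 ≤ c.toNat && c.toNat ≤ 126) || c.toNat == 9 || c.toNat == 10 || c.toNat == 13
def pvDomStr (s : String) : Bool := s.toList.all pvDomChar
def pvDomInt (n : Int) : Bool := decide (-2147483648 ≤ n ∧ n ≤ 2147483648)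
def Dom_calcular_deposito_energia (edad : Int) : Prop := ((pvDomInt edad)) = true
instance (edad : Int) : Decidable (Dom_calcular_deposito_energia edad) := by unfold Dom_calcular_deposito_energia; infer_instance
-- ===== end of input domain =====

-- B replaces A's range-dict linear scan with a guarded O(1) index into a flat list of the six values (objective: simpler).


-- ===== PORT A =====
-- helper for the for-loop with early return: scan the items, return first match
def pvScanDepositos (edad : Int) : List ((Int × Int) × Int) → Option Int
  | [] => none
  | p :: rest => if edad ≥ p.1.1 ∧ edad < p.1.2 then some p.2 else pvScanDepositos edad rest

def calcular_deposito_energia (edad : Int) : Option Int :=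
  -- literal port: iterate the dict's items in insertion order, return the first matching range's value
  pvScanDepositos edad
    ([((12,13),26), ((13,14),24), ((14,15),19), ((15,16),12), ((16,17),5), ((17,18),0)] : List ((Int × Int) × Int))

-- ===== PORT B =====
def calcular_deposito_energia_alt (edad : Int) : Option Int :=
  -- port of B: guarded direct index into the flat value list
  if 12 ≤ edad ∧ edad < 18 then
    PySem.List.pyGet? ([26, 24, 19, 12, 5, 0] : List Int) (edad - 12)
  else
    none

-- ===== PRECONDITION & SPEC =====
def Spec_calcular_deposito_energia (edad : Int) (out : Option Int) : Prop := out = calcular_deposito_energia_alt edad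
instance (edad : Int) (out : Option Int) : Decidable (Spec_calcular_deposito_energia edad out) := by unfold Spec_calcular_deposito_energia; infer_instance

-- ===== CLAIM (what is proved, stated in full; the proofs are below) =====
def Claim_equal_calcular_deposito_energia : Prop := ∀ (edad : Int), Dom_calcular_deposito_energia edad → Spec_calcular_deposito_energia edad (calcular_deposito_energia edad)

-- ===== LEMMAS AND PROOFS =====

-- ===== VERDICT (by name: the statement is the Claim_ definition above) =====
theorem calcular_deposito_energia_spec : Claim_equal_calcular_deposito_energia := by
  intro edad _
  unfold Spec_calcular_deposito_energia calcular_deposito_energia calcular_deposito_energia_alt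
  by_cases h : 12 ≤ edad ∧ edad < 18
  · obtain ⟨h1, h2⟩ := h
    interval_cases edad <;> decide
  · simp only [pvScanDepositos]
    split_ifs with h1 h2 h3 h4 h5 h6 <;> first | omega | rfl
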